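-- pv_equiv track=rewrite | github.com/CHZEE93/algorithm-study | CHZEE93/추천문제 Bronze ~ Silver/b1652.py | count_bed_positions
-- ===== SOURCE A (Python) =====
-- def count_bed_positions(N, room):
--     horizontal_count = 0
--     vertical_count = 0
--
--     # 가로 방향 탐색
--     for row in room:
--         count = 0
--         for cell in row:
--             if cell == '.':
--                 count += 1
--             else:
--                 if count >= 2:
--                     horizontal_count += 1
--                 count = 0
--         if count >= 2:
--             horizontal_count += 1
--
--     # 세로 방향 탐색
--     for col in range(N):
--         count = 0
--         for row in range(N):
--             if room[row][col] == '.':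
--                 count += 1
--             else:
--                 if count >= 2:
--                     vertical_count += 1
--                 count = 0
--         if count >= 2:
--             vertical_count += 1
--
--     return horizontal_count, vertical_count
-- ===== SOURCE B (Python) =====
-- def count_bed_positions(N, room):
--     # A maximal run of >=2 dots contains exactly one index i where two
--     # consecutive dots are not followed by a third dot, so counting that
--     # local 3-cell pattern counts the placeable runs without any run state.
--     horizontal = 0
--     for row in room:
--         n = len(row)
--         for i in range(n - 1):
--             if row[i] == '.' and row[i + 1] == '.' and (i + 2 == n or row[i + 2] != '.'):
--                 horizontal += 1
--     vertical = 0
--     for c in range(N):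
--         for r in range(N - 1):
--             if room[r][c] == '.' and room[r + 1][c] == '.' and (r + 2 == N or room[r + 2][c] != '.'):
--                 vertical += 1
--     return horizontal, vertical
-- ===== Notes on version B (the rewrite author's own statement) =====
-- stated objective: alternative
-- what changed: Replaces A's streaming run-counter state machine with a stateless local-pattern count: each placeable run is identified by its unique position where two consecutive dots are not followed by a third dot, so B counts occurrences of that 3-cell pattern with no run-length state.
import Mathlib
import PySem

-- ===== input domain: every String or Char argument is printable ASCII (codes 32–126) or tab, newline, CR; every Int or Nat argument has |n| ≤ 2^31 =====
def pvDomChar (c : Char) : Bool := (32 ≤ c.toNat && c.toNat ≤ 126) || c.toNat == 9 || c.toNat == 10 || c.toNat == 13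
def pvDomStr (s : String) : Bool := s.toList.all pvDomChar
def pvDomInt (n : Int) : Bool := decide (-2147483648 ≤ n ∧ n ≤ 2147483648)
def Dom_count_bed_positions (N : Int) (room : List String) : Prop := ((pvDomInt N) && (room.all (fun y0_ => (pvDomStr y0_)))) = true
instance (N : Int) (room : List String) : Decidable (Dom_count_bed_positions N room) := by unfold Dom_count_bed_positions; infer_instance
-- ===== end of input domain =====

-- B replaces A's streaming run-counter state machine by a stateless count of the local
-- 3-cell pattern '.. not followed by .', which occurs exactly once per placeable run.

-- ===== PORT A =====
-- one step of A's streaming counter: '.' increments the run counter, anything else flushes it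
def aStep (s : Int × Int) (cell : Char) : Int × Int :=
  if cell = '.' then (s.1 + 1, s.2)
  else if 2 ≤ s.1 then (0, s.2 + 1) else (0, s.2)

-- A's trailing 'if count >= 2: result += 1' after a line/column
def aFinish (s : Int × Int) : Int := if 2 ≤ s.1 then s.2 + 1 else s.2

-- room[r][c] as both Pythons index it (indices are in range under Pre_; the default is never hit there)
def pvCell (room : List String) (r c : Int) : Char :=
  PySem.List.pyGetD ((PySem.List.pyGetD room r "").toList) c ' '

def count_bed_positions (N : Int) (room : List String) : Int × Int :=
  let horizontal := room.foldl (fun h row => aFinish (row.toList.foldl aStep (0, h))) 0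
  let vertical := (PySem.List.pyRange 0 N 1).foldl
      (fun v col => aFinish ((PySem.List.pyRange 0 N 1).foldl
        (fun s r => aStep s (pvCell room r col)) (0, v))) 0
  (horizontal, vertical)

-- ===== PORT B =====
-- B's inner index loop: 'for i in range(n-1): if f(i)=='.' and f(i+1)=='.' and (i+2==n or f(i+2)!='.'): h += 1'
def bInner (f : Int → Char) (n : Int) (h0 : Int) : Int :=
  (PySem.List.pyRange 0 (n - 1) 1).foldl
    (fun h i => if f i = '.' ∧ f (i + 1) = '.' ∧ (i + 2 = n ∨ ¬ f (i + 2) = '.') then h + 1 else h)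
    h0

def count_bed_positions_alt (N : Int) (room : List String) : Int × Int :=
  let horizontal := room.foldl
    (fun h row => bInner (fun i => PySem.List.pyGetD row.toList i ' ') (row.toList.length : Int) h) 0
  let vertical := (PySem.List.pyRange 0 N 1).foldl
    (fun v c => bInner (fun r => pvCell room r c) N v) 0
  (horizontal, vertical)

-- ===== PRECONDITION & SPEC =====
-- Exactly the inputs where Python A returns: the vertical scan indexes room[r][c] for all r,c < N,
-- so A raises IndexError iff N exceeds the number of rows or the length of one of the first N rows.
def Pre_count_bed_positions (N : Int) (room : List String) : Prop :=
  N ≤ (room.length : Int) ∧ ∀ s ∈ room.take N.toNat, N ≤ (s.length : Int)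
instance (N : Int) (room : List String) : Decidable (Pre_count_bed_positions N room) := by
  unfold Pre_count_bed_positions; infer_instance

def pvWitness_count_bed_positions : Int × List String := (2, ["..", ".#"])

def Spec_count_bed_positions (N : Int) (room : List String) (out : Int × Int) : Prop := out = count_bed_positions_alt N room
instance (N : Int) (room : List String) (out : Int × Int) : Decidable (Spec_count_bed_positions N room out) := by unfold Spec_count_bed_positions; infer_instance

-- ===== CLAIM (what is proved, stated in full; the proofs are below) =====
def Claim_equal_count_bed_positions : Prop := ∀ (N : Int) (room : List String), Dom_count_bed_positions N room → Pre_count_bed_positions N room → Spec_count_bed_positions N room (count_bed_positions N room)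

-- ===== LEMMAS AND PROOFS =====

-- lengths of the maximal runs of '.' — proof-only characterisation shared by both sides
def dotRuns : List Char → List Nat
  | [] => []
  | c :: cs =>
    if c = '.' then (1 + (cs.takeWhile (· == '.')).length) :: dotRuns (cs.dropWhile (· == '.'))
    else dotRuns cs
termination_by cs => cs.length
decreasing_by
  · exact Nat.lt_succ_of_le (List.length_dropWhile_le _ _)
  · exact Nat.lt_succ_self _

def runCount (cs : List Char) : Int := ((dotRuns cs).countP (fun n => decide (2 ≤ n)) : Nat)

def leadInt (cs : List Char) : Int := ((cs.takeWhile (· == '.')).length : Int)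

-- B's local pattern, in Nat index form, and the pattern count over a char list
def natP (cs : List Char) (j : Nat) : Bool :=
  (cs.getD j ' ' == '.') && (cs.getD (j + 1) ' ' == '.') &&
    (decide (j + 2 = cs.length) || !(cs.getD (j + 2) ' ' == '.'))

def patIdx (cs : List Char) : Int := ((List.range (cs.length - 1)).countP (natP cs) : Nat)

theorem dotRuns_cons_not (c : Char) (cs : List Char) (h : ¬ c = '.') :
    dotRuns (c :: cs) = dotRuns cs := by
  rw [dotRuns]; simp [h]

theorem dotRuns_cons_dot (cs : List Char) :
    dotRuns ('.' :: cs) =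
      (1 + (cs.takeWhile (· == '.')).length) :: dotRuns (cs.dropWhile (· == '.')) := by
  rw [dotRuns]; simp

theorem runCount_flush (cs : List Char) :
    runCount cs = (if 2 ≤ leadInt cs then 1 else 0) + runCount (cs.dropWhile (· == '.')) := by
  cases cs with
  | nil => simp [runCount, dotRuns, leadInt]
  | cons c cs =>
    by_cases h : c = '.'
    · subst h
      simp [runCount, dotRuns_cons_dot, List.countP_cons, leadInt]
      split_ifs <;> omega
    · simp [runCount, dotRuns_cons_not c cs h, leadInt, h]

theorem key (cs : List Char) : ∀ c h : Int,
    aFinish (cs.foldl aStep (c, h)) =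
      h + (if 2 ≤ c + leadInt cs then 1 else 0) + runCount (cs.dropWhile (· == '.')) := by
  induction cs with
  | nil =>
    intro c h
    simp [aFinish, leadInt, runCount, dotRuns]
    split_ifs <;> omega
  | cons x cs ih =>
    intro c h
    by_cases hx : x = '.'
    · subst hx
      rw [List.foldl_cons]
      have hstep : aStep (c, h) '.' = (c + 1, h) := by simp [aStep]
      rw [hstep, ih (c + 1) h]
      have h1 : leadInt ('.' :: cs) = 1 + leadInt cs := by
        simp [leadInt]; ring
      have h2 : List.dropWhile (· == '.') ('.' :: cs) = cs.dropWhile (· == '.') := by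
        simp
      rw [h1, h2]
      have h3 : c + 1 + leadInt cs = c + (1 + leadInt cs) := by ring
      rw [h3]
    · rw [List.foldl_cons]
      have hstep : aStep (c, h) x = (0, if 2 ≤ c then h + 1 else h) := by
        simp [aStep, hx]; split_ifs <;> rfl
      rw [hstep, ih 0 _]
      have h1 : leadInt (x :: cs) = 0 := by simp [leadInt, hx]
      have h3 : runCount (x :: cs) = runCount cs := by
        simp [runCount, dotRuns_cons_not x cs hx]
      have h2 : List.dropWhile (· == '.') (x :: cs) = x :: cs := by
        simp [hx]
      rw [h1, h2, h3, runCount_flush cs]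
      simp only [zero_add, add_zero]
      split_ifs <;> ring

theorem rowDone (cs : List Char) (h : Int) :
    aFinish (cs.foldl aStep (0, h)) = h + runCount cs := by
  rw [key cs 0 h, runCount_flush cs]
  simp only [zero_add, add_assoc]

theorem foldl_map' {α β σ : Type} (f : α → β) (g : σ → β → σ) (l : List α) (init : σ) :
    l.foldl (fun s a => g s (f a)) init = (l.map f).foldl g init := by
  induction l generalizing init with
  | nil => rfl
  | cons a l ih => simp [List.foldl_cons, ih]

theorem colDone (room : List String) (N v col : Int) :
    aFinish ((PySem.List.pyRange 0 N 1).foldl (fun s r => aStep s (pvCell room r col)) (0, v))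
      = v + runCount ((PySem.List.pyRange 0 N 1).map (fun r => pvCell room r col)) := by
  have h := foldl_map' (fun r => pvCell room r col) aStep (PySem.List.pyRange 0 N 1)
    ((0 : Int), v)
  rw [h]
  exact rowDone _ v

-- counting fold = countP
theorem foldl_count {α : Type} (p : α → Prop) [DecidablePred p] (l : List α) (h0 : Int) :
    l.foldl (fun h a => if p a then h + 1 else h) h0 = h0 + ((l.countP (fun a => decide (p a))) : Nat) := by
  induction l generalizing h0 with
  | nil => simp
  | cons a l ih =>
    rw [List.foldl_cons, ih, List.countP_cons]
    by_cases hp : p a <;> simp [hp] <;> ring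

-- index shift: the pattern count of a::cs splits into the head pattern plus the count of cs
theorem patIdx_cons (a : Char) (cs : List Char) :
    patIdx (a :: cs) = (if natP (a :: cs) 0 then 1 else 0) + patIdx cs := by
  cases cs with
  | nil => simp [patIdx, natP]
  | cons b rest =>
    have hlen : (a :: b :: rest).length - 1 = rest.length + 1 := by simp
    have hshift : ∀ j : Nat, natP (a :: b :: rest) (j + 1) = natP (b :: rest) j := by
      intro j
      have hdec : decide (j + 1 + 2 = (a :: b :: rest).length) = decide (j + 2 = (b :: rest).length) := by
        simp only [List.length_cons]
        exact decide_eq_decide.mpr (by omega)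
      simp only [natP, List.getD_cons_succ, hdec]
    rw [patIdx, hlen, List.range_succ_eq_map, List.countP_cons, List.countP_map]
    have : List.countP (natP (a :: b :: rest) ∘ Nat.succ) (List.range rest.length)
        = List.countP (natP (b :: rest)) (List.range rest.length) := by
      apply List.countP_congr
      intro j _
      simp [Function.comp, Nat.succ_eq_add_one, hshift j]
    rw [this]
    have hl2 : (b :: rest).length - 1 = rest.length := by simp
    rw [patIdx, hl2]
    by_cases h0 : natP (a :: b :: rest) 0 = true <;> simp [h0] <;> ring

-- the 3-cell pattern occurs exactly once per maximal run of length ≥ 2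
theorem patIdx_eq_runCount (cs : List Char) : patIdx cs = runCount cs := by
  induction cs with
  | nil => simp [patIdx, runCount, dotRuns]
  | cons a cs ih =>
    rw [patIdx_cons, ih]
    by_cases ha : a = '.'
    · subst ha
      cases cs with
      | nil =>
        simp [natP, runCount, dotRuns, List.getD]
      | cons b rest =>
        by_cases hb : b = '.'
        · subst hb
          -- head pattern holds iff rest does not start with '.'
          have hflush : runCount ('.' :: '.' :: rest) = 1 + runCount (rest.dropWhile (· == '.')) := by
            rw [runCount_flush]
            have hl : leadInt ('.' :: '.' :: rest) = 2 + leadInt rest := by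
              simp [leadInt]; ring
            have hd : List.dropWhile (· == '.') ('.' :: '.' :: rest) = rest.dropWhile (· == '.') := by
              simp
            rw [hl, hd]
            have : (2:Int) ≤ 2 + leadInt rest := by
              have : (0:Int) ≤ leadInt rest := by simp [leadInt]
              omega
            simp [this]
          have hflush2 : runCount ('.' :: rest) =
              (if 1 ≤ leadInt rest then 1 else 0) + runCount (rest.dropWhile (· == '.')) := by
            rw [runCount_flush]
            have hl : leadInt ('.' :: rest) = 1 + leadInt rest := by
              simp [leadInt]; ring
            have hd : List.dropWhile (· == '.') ('.' :: rest) = rest.dropWhile (· == '.') := by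
              simp
            rw [hl, hd]
            congr 1
            by_cases h : (1:Int) ≤ leadInt rest
            · have : (2:Int) ≤ 1 + leadInt rest := by omega
              simp [h, this]
            · have : ¬ (2:Int) ≤ 1 + leadInt rest := by omega
              simp [h, this]
          rw [hflush, hflush2]
          cases rest with
          | nil =>
            have : natP ('.' :: '.' :: []) 0 = true := by decide
            simp [this, leadInt]
          | cons r rs =>
            by_cases hr : r = '.'
            · subst hr
              have hnp : natP ('.' :: '.' :: '.' :: rs) 0 = false := by
                simp [natP, List.getD]
              have hlead : (1:Int) ≤ leadInt ('.' :: rs) := by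
                have h0 : (0:Int) ≤ ((rs.takeWhile (· == '.')).length : Int) := by positivity
                simp [leadInt]
              simp [hnp, hlead]
            · have hnp : natP ('.' :: '.' :: r :: rs) 0 = true := by
                simp [natP, List.getD, hr]
              have hlead : leadInt (r :: rs) = 0 := by simp [leadInt, hr]
              have : ¬ (1:Int) ≤ leadInt (r :: rs) := by omega
              simp [hnp, this]
        · -- second cell is not '.': head pattern false and the leading single dot contributes nothing
          have hnp : natP ('.' :: b :: rest) 0 = false := by
            simp [natP, List.getD, hb]
          have hflush : runCount ('.' :: b :: rest) = runCount (b :: rest) := by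
            rw [runCount_flush]
            have hl : leadInt ('.' :: b :: rest) = 1 := by simp [leadInt, hb]
            have hd : List.dropWhile (· == '.') ('.' :: b :: rest) = b :: rest := by simp [hb]
            rw [hl, hd]; norm_num
          simp [hnp, hflush]
    · -- a ≠ '.': head pattern false, run structure unchanged
      have hnp : natP (a :: cs) 0 = false := by
        simp [natP, ha]
      rw [hnp]
      simp [runCount, dotRuns_cons_not a cs ha]

-- bridge: B's Int index loop over f, n counts exactly the patterns of the materialised list
theorem bInner_eq (f : Int → Char) (n h0 : Int) :
    bInner f n h0 = h0 + patIdx ((PySem.List.pyRange 0 n 1).map f) := by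
  by_cases hn : n ≤ 0
  · have h1 : PySem.List.pyRange 0 (n - 1) 1 = [] := PySem.List.pyRange_one_eq_nil (by omega)
    have h2 : PySem.List.pyRange 0 n 1 = [] := PySem.List.pyRange_one_eq_nil (by omega)
    simp [bInner, h1, h2, patIdx]
  · have hm : ((n.toNat : Int)) = n := Int.toNat_of_nonneg (by omega)
    have hL : ((PySem.List.pyRange 0 n 1).map f).length = n.toNat := by
      simp [PySem.List.length_pyRange_one]
    have hget : ∀ k : Nat, k < n.toNat → ((PySem.List.pyRange 0 n 1).map f).getD k ' ' = f (k : Int) := by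
      intro k hk
      have hkn : (k : Int) < n := by omega
      rw [← PySem.List.pyGetD_natCast]
      exact PySem.List.pyGetD_map_pyRange_of_nonneg f n _ ' ' (by positivity) hkn
    rw [bInner, PySem.List.pyRange_one, ← foldl_map'
      (fun k : Nat => (0 : Int) + (k : Int))
      (fun h i => if f i = '.' ∧ f (i + 1) = '.' ∧ (i + 2 = n ∨ ¬ f (i + 2) = '.') then h + 1 else h)]
    rw [foldl_count (fun k : Nat =>
      f (0 + (k : Int)) = '.' ∧ f (0 + (k : Int) + 1) = '.' ∧
        (0 + (k : Int) + 2 = n ∨ ¬ f (0 + (k : Int) + 2) = '.'))]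
    congr 1
    rw [patIdx, hL]
    have hrange : (n - 1 - 0).toNat = n.toNat - 1 := by omega
    rw [hrange]
    congr 1
    apply List.countP_congr
    intro j hj
    have hj' : j < n.toNat - 1 := List.mem_range.mp hj
    have c0 : (0 : Int) + (j : Int) = ((j : Nat) : Int) := by omega
    have c1 : (0 : Int) + (j : Int) + 1 = ((j + 1 : Nat) : Int) := by omega
    have c2 : (0 : Int) + (j : Int) + 2 = ((j + 2 : Nat) : Int) := by omega
    have c2' : ((j + 2 : Nat) : Int) = (j : Int) + 2 := by omega
    have g0 := hget j (by omega)
    have g1 := hget (j + 1) (by omega)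
    simp only [decide_eq_true_eq, c0, natP, g0, g1, hL,
      Bool.and_eq_true, Bool.or_eq_true, beq_iff_eq, Bool.not_eq_eq_eq_not,
      Bool.not_true, beq_eq_false_iff_ne, ne_eq]
    constructor
    · rintro ⟨ha, hb, hc⟩
      refine ⟨⟨ha, hb⟩, ?_⟩
      rcases hc with hc | hc
      · left; omega
      · by_cases he : j + 2 = n.toNat
        · left; exact he
        · right; rw [hget (j + 2) (by omega), c2']; exact hc
    · rintro ⟨⟨ha, hb⟩, hc⟩
      refine ⟨ha, hb, ?_⟩
      rcases hc with hc | hc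
      · left; omega
      · by_cases he : ((j + 2 : Nat) : Int) = n
        · left; exact he
        · right; rw [← c2', ← hget (j + 2) (by omega)]; exact hc

-- the two step functions agree per row / per column
theorem row_step_eq (h : Int) (row : String) :
    aFinish (row.toList.foldl aStep (0, h)) =
      bInner (fun i => PySem.List.pyGetD row.toList i ' ') (row.toList.length : Int) h := by
  rw [bInner_eq, PySem.List.map_pyGetD_pyRange_zero', patIdx_eq_runCount, rowDone]

theorem col_step_eq (room : List String) (N v col : Int) :
    aFinish ((PySem.List.pyRange 0 N 1).foldl (fun s r => aStep s (pvCell room r col)) (0, v)) =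
      bInner (fun r => pvCell room r col) N v := by
  rw [bInner_eq, patIdx_eq_runCount, colDone]

-- ===== VERDICT (by name: the statement is the Claim_ definition above) =====
theorem count_bed_positions_spec : Claim_equal_count_bed_positions := by
  intro N room _ _
  unfold Spec_count_bed_positions count_bed_positions count_bed_positions_alt
  refine Prod.ext ?_ ?_
  · show room.foldl (fun h row => aFinish (row.toList.foldl aStep (0, h))) 0 = _
    have : (fun (h : Int) (row : String) => aFinish (row.toList.foldl aStep (0, h)))
        = fun h row => bInner (fun i => PySem.List.pyGetD row.toList i ' ') (row.toList.length : Int) h :=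
      funext fun h => funext fun row => row_step_eq h row
    rw [this]
  · show (PySem.List.pyRange 0 N 1).foldl _ 0 = _
    have : (fun (v col : Int) => aFinish ((PySem.List.pyRange 0 N 1).foldl
          (fun s r => aStep s (pvCell room r col)) (0, v)))
        = fun v c => bInner (fun r => pvCell room r c) N v :=
      funext fun v => funext fun col => col_step_eq room N v col
    rw [this]
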